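-- pv_equiv track=rewrite | github.com/UBS-Coding-Challenge/test | src/questions/q13_digital_colony/solution2.py | q13_solution
-- ===== SOURCE A (Python) =====
-- def q13_solution(generations: int, colony: str):
--     dp = [[[-1 for _ in range(generations + 1)] for _ in range(10)] for _ in range(10)]
--     n = len(colony)
--     res = int(colony[-1])
--     for i in range(n - 1):
--         x, y = int(colony[i]), int(colony[i + 1])
--         t = f(dp, x, y, generations)
--         res += (t - y)
--     return res
--
-- def f(dp, i, j, gens):
--     if gens == 0:
--         return i + j
--
--     if dp[i][j][gens] != -1:
--         return dp[i][j][gens]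
--
--     new_val = int(str(i + j + (i - j if i >= j else 10 - (j - i)))[-1])
--
--     dp[i][j][gens] = f(dp, i, new_val, gens - 1) + f(dp, new_val, j, gens - 1) - new_val
--     return dp[i][j][gens]
-- ===== SOURCE B (Python) =====
-- def q13_solution(generations: int, colony: str):
--     # Bottom-up: one 10x10 layer per generation; the child digit of a pair
--     # (i, j) is always (2*i) % 10, so each step is a pure table update.
--     layer = [[i + j for j in range(10)] for i in range(10)]
--     for _ in range(generations):
--         prev = layer
--         layer = [[prev[i][(2 * i) % 10] + prev[(2 * i) % 10][j] - (2 * i) % 10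
--                   for j in range(10)] for i in range(10)]
--     digits = [int(c) for c in colony]
--     res = digits[-1]
--     for x, y in zip(digits, digits[1:]):
--         res += layer[x][y] - y
--     return res
-- ===== Notes on version B (the rewrite author's own statement) =====
-- stated objective: alternative
-- what changed: Replaces the top-down memoized recursion over (i,j,gens) (a mutated 3D memo table) with a bottom-up iterated 10x10 DP layer per generation (noting the child digit of a pair (i,j) is always (2*i)%10) and a zip over adjacent digit pairs.
import Mathlib
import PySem

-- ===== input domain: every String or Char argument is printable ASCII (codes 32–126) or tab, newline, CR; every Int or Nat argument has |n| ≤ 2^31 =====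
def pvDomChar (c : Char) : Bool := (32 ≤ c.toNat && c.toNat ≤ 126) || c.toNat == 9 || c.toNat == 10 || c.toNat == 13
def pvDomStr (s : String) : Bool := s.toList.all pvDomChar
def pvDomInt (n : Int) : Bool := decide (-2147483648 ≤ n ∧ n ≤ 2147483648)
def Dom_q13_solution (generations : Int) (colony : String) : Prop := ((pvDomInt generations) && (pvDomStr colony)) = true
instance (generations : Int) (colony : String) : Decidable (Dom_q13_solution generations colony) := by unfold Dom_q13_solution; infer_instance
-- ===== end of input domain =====

-- B replaces A's top-down memoized recursion by a bottom-up iterated 10x10 layer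
-- (alternative decomposition, same cost); return values only (A mutates only its local memo).

-- int(<single char>), shared primitive composite used by both ports
def pvDig (c : Char) : Int := (PySem.Int.ofStr? (String.ofList [c])).getD 0

-- ===== PORT A =====
-- int(colony[i]) : index (IndexError = none, excluded by Pre_) then parse
def pvDigAt (colony : String) (i : Int) : Int := ((PySem.Str.pyGet? colony i).map pvDig).getD 0

-- new_val = int(str(i + j + (i - j if i >= j else 10 - (j - i)))[-1])
def pvNewVal (i j : Int) : Int :=
  ((PySem.Str.pyGet? (PySem.Int.toStr (i + j + (if j ≤ i then i - j else 10 - (j - i)))) (-1)).map pvDig).getD 0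

-- f(dp, i, j, gens): the Python 3D memo list (default -1) is modelled as a Dict keyed
-- (i, j, gens) with default -1; mutation is threaded as state.  Python's f is only
-- reached with gens = generations ≥ 0 on inputs where A returns (Pre_), so the
-- structural Nat recursion on generations.toNat is exact there.
def pvF (dp : PySem.Dict (Int × Int × Int) Int) (i j : Int) :
    (gens : Nat) → PySem.Dict (Int × Int × Int) Int × Int
  | 0 => (dp, i + j)
  | g + 1 =>
    let cur := dp.getD (i, j, ((g + 1 : Nat) : Int)) (-1)
    if cur ≠ -1 then (dp, cur)
    else
      let nv := pvNewVal i j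
      let r1 := pvF dp i nv g
      let r2 := pvF r1.1 nv j g
      let v := r1.2 + r2.2 - nv
      (r2.1.insert (i, j, ((g + 1 : Nat) : Int)) v, v)

def q13_solution (generations : Int) (colony : String) : Int :=
  let n : Int := PySem.Str.len colony
  let res0 : Int := pvDigAt colony (-1)
  let st := (PySem.List.pyRange 0 (n - 1) 1).foldl
    (fun (s : PySem.Dict (Int × Int × Int) Int × Int) i =>
      let x := pvDigAt colony i
      let y := pvDigAt colony (i + 1)
      let r := pvF s.1 x y generations.toNat
      (r.1, s.2 + (r.2 - y)))
    (PySem.Dict.empty, res0)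
  st.2

-- ===== PORT B =====
def pvLayer0 : List (List Int) :=
  (List.range 10).map (fun (i : Nat) => (List.range 10).map (fun (j : Nat) => ((i : Int) + (j : Int))))

def pvStep (L : List (List Int)) : List (List Int) :=
  (List.range 10).map (fun (i : Nat) => (List.range 10).map (fun (j : Nat) =>
    (L.getD i []).getD ((2 * i) % 10) 0 + (L.getD ((2 * i) % 10) []).getD j 0
      - (((2 * i) % 10 : Nat) : Int)))

-- layer[x][y] with Python int indices (always digits at call sites)
def pvLook (L : List (List Int)) (x y : Int) : Int :=
  PySem.List.pyGetD (PySem.List.pyGetD L x []) y 0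

def q13_solution_alt (generations : Int) (colony : String) : Int :=
  let layer := pvStep^[generations.toNat] pvLayer0
  let digits := colony.toList.map pvDig
  let res0 := PySem.List.pyGetD digits (-1) 0
  (digits.zip digits.tail).foldl (fun r p => r + (pvLook layer p.1 p.2 - p.2)) res0

-- ===== PRECONDITION & SPEC =====
-- Pre_: exactly where the Python A returns: a non-empty all-digit colony, and
-- generations ≥ 0 unless the colony has a single digit (then the loop body, which
-- would index an empty/undersized memo row for negative generations, never runs).
def Pre_q13_solution (generations : Int) (colony : String) : Prop :=
  colony.toList ≠ [] ∧
  colony.toList.all (fun c => c ∈ ['0','1','2','3','4','5','6','7','8','9']) = true ∧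
  (0 ≤ generations ∨ colony.toList.length = 1)
instance (generations : Int) (colony : String) : Decidable (Pre_q13_solution generations colony) := by
  unfold Pre_q13_solution; infer_instance

def pvWitness_q13_solution : Int × String := (2, "123")

def Spec_q13_solution (generations : Int) (colony : String) (out : Int) : Prop := out = q13_solution_alt generations colony
instance (generations : Int) (colony : String) (out : Int) : Decidable (Spec_q13_solution generations colony out) := by unfold Spec_q13_solution; infer_instance

-- ===== CLAIM (what is proved, stated in full; the proofs are below) =====
def Claim_equal_q13_solution : Prop := ∀ (generations : Int) (colony : String), Dom_q13_solution generations colony → Pre_q13_solution generations colony → Spec_q13_solution generations colony (q13_solution generations colony)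

-- ===== LEMMAS AND PROOFS =====

-- mathematical value of f / of the layer entries: child digit of (i, j) is (2*i) % 10
def pvNv (i : Int) : Int := (2 * i) % 10

def pvFm : Nat → Int → Int → Int
  | 0, i, j => i + j
  | g + 1, i, j => pvFm g i (pvNv i) + pvFm g (pvNv i) j - pvNv i

def pvPairSum (G : Nat) (l : List Int) : Int :=
  ((l.zip l.tail).map (fun p => pvFm G p.1 p.2 - p.2)).sum

lemma pvDig_bounds (c : Char) (h : c ∈ ['0','1','2','3','4','5','6','7','8','9']) :
    0 ≤ pvDig c ∧ pvDig c ≤ 9 := by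
  fin_cases h <;> decide

lemma pvNewVal_eq (i j : Int) (h0 : 0 ≤ i) (h1 : i ≤ 9) (h2 : 0 ≤ j) (h3 : j ≤ 9) :
    pvNewVal i j = pvNv i := by
  interval_cases i <;> interval_cases j <;> decide

lemma pvNv_bounds (i : Int) : 0 ≤ pvNv i ∧ pvNv i ≤ 9 := by
  unfold pvNv
  constructor
  · exact Int.emod_nonneg _ (by norm_num)
  · have := Int.emod_lt_of_pos (2 * i) (b := 10) (by norm_num); omega

def pvInv (dp : PySem.Dict (Int × Int × Int) Int) : Prop :=
  ∀ (a b : Int) (h : Nat), 0 ≤ a → a ≤ 9 → 0 ≤ b → b ≤ 9 →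
    dp.getD (a, b, (h : Int)) (-1) = -1 ∨ dp.getD (a, b, (h : Int)) (-1) = pvFm h a b

lemma pvF_spec : ∀ (g : Nat) (dp : PySem.Dict (Int × Int × Int) Int) (i j : Int),
    pvInv dp → 0 ≤ i → i ≤ 9 → 0 ≤ j → j ≤ 9 →
    (pvF dp i j g).2 = pvFm g i j ∧ pvInv (pvF dp i j g).1 := by
  intro g
  induction g with
  | zero => intro dp i j hinv _ _ _ _; exact ⟨rfl, hinv⟩
  | succ g ih =>
    intro dp i j hinv hi0 hi1 hj0 hj1
    show (pvF dp i j (g+1)).2 = pvFm (g+1) i j ∧ pvInv (pvF dp i j (g+1)).1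
    rw [pvF]
    by_cases hc : dp.getD (i, j, ((g + 1 : Nat) : Int)) (-1) ≠ -1
    · rw [if_pos hc]
      rcases hinv i j (g+1) hi0 hi1 hj0 hj1 with h | h
      · exact absurd h hc
      · exact ⟨h, hinv⟩
    · rw [if_neg hc]
      dsimp only
      have hnv := pvNewVal_eq i j hi0 hi1 hj0 hj1
      have hb := pvNv_bounds i
      have h1 := ih dp i (pvNewVal i j) hinv hi0 hi1 (hnv ▸ hb.1) (hnv ▸ hb.2)
      have h2 := ih (pvF dp i (pvNewVal i j) g).1 (pvNewVal i j) j h1.2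
        (hnv ▸ hb.1) (hnv ▸ hb.2) hj0 hj1
      constructor
      · rw [pvFm, h1.1, h2.1, hnv]
      · intro a b h ha0 ha1 hb0 hb1
        rw [PySem.Dict.getD_insert]
        by_cases hk : (a, b, (h : Int)) = (i, j, ((g + 1 : Nat) : Int))
        · rw [if_pos hk]
          right
          rw [Prod.ext_iff, Prod.ext_iff] at hk
          obtain ⟨ha, hbj, hh⟩ := hk
          simp only at ha hbj hh
          have hh' : h = g + 1 := by exact_mod_cast hh
          subst ha hh'
          obtain rfl : b = j := hbj
          rw [pvFm, h1.1, h2.1, hnv]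
        · rw [if_neg hk]
          exact h2.2 a b h ha0 ha1 hb0 hb1

lemma pvInv_empty : pvInv PySem.Dict.empty := by
  intro a b h _ _ _ _
  left
  simp [PySem.Dict.getD_empty]

lemma A_loop (G : Nat) : ∀ (l : List Int), (∀ x ∈ l, 0 ≤ x ∧ x ≤ 9) →
    ∀ dp res, pvInv dp →
    ((List.range (l.length - 1)).foldl
      (fun (s : PySem.Dict (Int × Int × Int) Int × Int) k =>
        (( pvF s.1 (l.getD k 0) (l.getD (k + 1) 0) G).1,
          s.2 + ((pvF s.1 (l.getD k 0) (l.getD (k + 1) 0) G).2 - l.getD (k + 1) 0)))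
      (dp, res)).2
    = res + pvPairSum G l := by
  intro l
  induction l with
  | nil => intro _ dp res _; simp [pvPairSum]
  | cons a t iht =>
    cases t with
    | nil => intro _ dp res _; simp [pvPairSum]
    | cons b t =>
      intro hmem dp res hinv
      have ha := hmem a (by simp)
      have hb := hmem b (by simp)
      have hstep := pvF_spec G dp a b hinv ha.1 ha.2 hb.1 hb.2
      have hlen : (a :: b :: t).length - 1 = t.length + 1 := by simp
      rw [hlen, List.range_succ_eq_map, List.foldl_cons]
      simp only [List.getD_cons_zero, List.getD_cons_succ, List.foldl_map]
      rw [hstep.1]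
      have := iht (fun x hx => hmem x (List.mem_cons_of_mem a hx))
        (pvF dp a b G).1 (res + (pvFm G a b - b)) hstep.2
      simp only [List.length_cons, Nat.add_sub_cancel, List.getD_cons_succ] at this
      rw [this]
      simp [pvPairSum]
      ring

lemma layer_spec : ∀ (g : Nat) (a b : Nat), a < 10 → b < 10 →
    ((pvStep^[g] pvLayer0).getD a []).getD b 0 = pvFm g (a : Int) (b : Int) := by
  intro g
  induction g with
  | zero =>
    intro a b ha hb
    simp only [Function.iterate_zero, id_eq, pvLayer0]
    rw [PySem.List.getD_map_range _ _ _ _ ha, PySem.List.getD_map_range _ _ _ _ hb, pvFm]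
  | succ g ih =>
    intro a b ha hb
    rw [Function.iterate_succ_apply', pvStep,
      PySem.List.getD_map_range _ _ _ _ ha, PySem.List.getD_map_range _ _ _ _ hb]
    have hnv : (2 * a) % 10 < 10 := Nat.mod_lt _ (by norm_num)
    rw [ih a ((2 * a) % 10) ha hnv, ih ((2 * a) % 10) b hnv hb, pvFm]
    have hcast : (((2 * a) % 10 : Nat) : Int) = pvNv (a : Int) := by
      unfold pvNv; push_cast; ring_nf
    rw [hcast]

lemma B_loop (G : Nat) : ∀ (l : List Int), (∀ x ∈ l, 0 ≤ x ∧ x ≤ 9) → ∀ res,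
    (l.zip l.tail).foldl (fun r p => r + (pvLook (pvStep^[G] pvLayer0) p.1 p.2 - p.2)) res
    = res + pvPairSum G l := by
  intro l
  induction l with
  | nil => intro _ res; simp [pvPairSum]
  | cons a t iht =>
    cases t with
    | nil => intro _ res; simp [pvPairSum]
    | cons b t =>
      intro hmem res
      have ha := hmem a (by simp)
      have hb := hmem b (by simp)
      have hlook : pvLook (pvStep^[G] pvLayer0) a b = pvFm G a b := by
        unfold pvLook
        rw [show a = ((a.toNat : Nat) : Int) from (Int.toNat_of_nonneg ha.1).symm,
            show b = ((b.toNat : Nat) : Int) from (Int.toNat_of_nonneg hb.1).symm,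
            PySem.List.pyGetD_natCast, PySem.List.pyGetD_natCast,
            layer_spec G a.toNat b.toNat (by omega) (by omega)]
      simp only [List.tail_cons, List.zip_cons_cons, List.foldl_cons]
      rw [hlook]
      have hrec := iht (fun x hx => hmem x (List.mem_cons_of_mem a hx)) (res + (pvFm G a b - b))
      simp only [List.tail_cons] at hrec
      rw [hrec]
      simp [pvPairSum]
      ring

lemma pvDigAt_natCast (colony : String) (k : Nat) :
    pvDigAt colony (k : Int) = (colony.toList.map pvDig).getD k 0 := by
  simp [pvDigAt, List.getD_eq_getElem?_getD, List.getElem?_map]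

-- ===== VERDICT (by name: the statement is the Claim_ definition above) =====
theorem q13_solution_spec : Claim_equal_q13_solution := by
  intro generations colony _hdom hpre
  obtain ⟨hne, hdig, -⟩ := hpre
  rw [List.all_eq_true] at hdig
  simp only [decide_eq_true_eq] at hdig
  unfold Spec_q13_solution q13_solution q13_solution_alt
  dsimp only
  have hbounds : ∀ x ∈ colony.toList.map pvDig, 0 ≤ x ∧ x ≤ 9 := by
    intro x hx
    obtain ⟨c, hc, rfl⟩ := List.mem_map.1 hx
    exact pvDig_bounds c (hdig c hc)
  have hres0 : pvDigAt colony (-1) = PySem.List.pyGetD (colony.toList.map pvDig) (-1) 0 := by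
    unfold pvDigAt PySem.List.pyGetD
    rw [show PySem.Str.pyGet? colony (-1) = PySem.List.pyGet? colony.toList (-1) from rfl,
        PySem.List.pyGet?_neg_one, PySem.List.pyGet?_neg_one, List.getLast?_map]
  rw [PySem.Str.len_eq, PySem.List.pyRange_one, List.foldl_map]
  have hlen : ((colony.toList.length : Int) - 1 - 0).toNat = (colony.toList.map pvDig).length - 1 := by
    rw [List.length_map]; omega
  rw [hlen]
  have hbody : (fun (s : PySem.Dict (Int × Int × Int) Int × Int) (k : Nat) =>
      ((pvF s.1 (pvDigAt colony (0 + (k : Int))) (pvDigAt colony (0 + (k : Int) + 1)) generations.toNat).1,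
        s.2 + ((pvF s.1 (pvDigAt colony (0 + (k : Int))) (pvDigAt colony (0 + (k : Int) + 1)) generations.toNat).2
          - pvDigAt colony (0 + (k : Int) + 1))))
      = (fun (s : PySem.Dict (Int × Int × Int) Int × Int) (k : Nat) =>
      ((pvF s.1 ((colony.toList.map pvDig).getD k 0) ((colony.toList.map pvDig).getD (k + 1) 0) generations.toNat).1,
        s.2 + ((pvF s.1 ((colony.toList.map pvDig).getD k 0) ((colony.toList.map pvDig).getD (k + 1) 0) generations.toNat).2
          - (colony.toList.map pvDig).getD (k + 1) 0))) := by
    funext s k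
    have h1 : (0 : Int) + (k : Int) = ((k : Nat) : Int) := by omega
    have h2 : (k : Int) + 1 = (((k + 1 : Nat)) : Int) := by omega
    rw [h1, h2, pvDigAt_natCast, pvDigAt_natCast]
  rw [hbody, A_loop generations.toNat (colony.toList.map pvDig) hbounds
      PySem.Dict.empty (pvDigAt colony (-1)) pvInv_empty,
    B_loop generations.toNat (colony.toList.map pvDig) hbounds
      (PySem.List.pyGetD (colony.toList.map pvDig) (-1) 0), hres0]
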